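-- pv_equiv track=rewrite | github.com/SiriRise/ApitSodok | main.py | password_encryption
-- ===== SOURCE A (Python) =====
-- def password_encryption(password):
--     key = 3
--     encryption_password = ""
--     for i in password:
--         encryption_password_temp = chr(ord(i) + key)
--         encryption_password += encryption_password_temp
--         key = -key + 1
--     return encryption_password
-- ===== SOURCE B (Python) =====
-- def password_encryption(password):
--     # Staged: split into the even- and odd-position subsequences by stride
--     # slicing, shift each wholesale (+3 / -2), then interleave them back.
--     plus = [chr(ord(c) + 3) for c in password[0::2]]
--     minus = [chr(ord(c) - 2) for c in password[1::2]]
--     out = []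
--     for p, m in zip(plus, minus):
--         out.append(p)
--         out.append(m)
--     out.extend(plus[len(minus):])
--     return ''.join(out)
-- ===== Notes on version B (the rewrite author's own statement) =====
-- stated objective: alternative
-- what changed: Instead of one pass threading a mutating key variable, B splits the string into its even- and odd-position subsequences by stride slicing, shifts each subsequence wholesale (+3 and -2) and interleaves them back with zip; no key state or per-character conditional exists.
import Mathlib
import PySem

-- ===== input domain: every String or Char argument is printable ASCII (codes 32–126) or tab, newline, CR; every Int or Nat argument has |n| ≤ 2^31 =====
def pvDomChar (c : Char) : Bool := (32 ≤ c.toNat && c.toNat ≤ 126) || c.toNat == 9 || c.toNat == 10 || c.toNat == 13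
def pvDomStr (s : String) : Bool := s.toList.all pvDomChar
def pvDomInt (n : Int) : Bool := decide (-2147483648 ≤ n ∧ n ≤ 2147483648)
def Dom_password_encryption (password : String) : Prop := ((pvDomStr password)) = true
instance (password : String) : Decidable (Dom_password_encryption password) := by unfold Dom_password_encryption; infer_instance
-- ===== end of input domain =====

-- B splits the string into even/odd-position subsequences, shifts each wholesale (+3/-2) and interleaves them, replacing A's loop with its mutating key variable.

-- ===== PORT A =====
-- key/accumulator threaded through the loop exactly as in A
def password_encryption (password : String) : String :=
  let r := password.toList.foldl
    (fun (st : Int × List Char) i =>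
      (-st.1 + 1, st.2 ++ [Char.ofNat ((i.toNat : Int) + st.1).toNat]))
    (3, [])
  String.mk r.2

-- ===== PORT B =====
-- password[0::2] / password[1::2]: stride-2 slicing, ported by hand (exact: step 2 from a nonnegative start takes every other element)
def pvStride2 : List Char → List Char
  | [] => []
  | [a] => [a]
  | a :: _ :: rest => a :: pvStride2 rest

def password_encryption_alt (password : String) : String :=
  let plus := (pvStride2 password.toList).map (fun c => Char.ofNat ((c.toNat : Int) + 3).toNat)
  let minus := (pvStride2 (password.toList.drop 1)).map (fun c => Char.ofNat ((c.toNat : Int) - 2).toNat)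
  let out := (plus.zip minus).foldl (fun acc pm => acc ++ [pm.1, pm.2]) []
  -- plus[len(minus):] with a nonnegative in-range index is exactly List.drop
  String.mk (out ++ plus.drop minus.length)

-- ===== PRECONDITION & SPEC =====
def Spec_password_encryption (password : String) (out : String) : Prop := out = password_encryption_alt password
instance (password : String) (out : String) : Decidable (Spec_password_encryption password out) := by unfold Spec_password_encryption; infer_instance

-- ===== CLAIM (what is proved, stated in full; the proofs are below) =====
def Claim_equal_password_encryption : Prop := ∀ (password : String), Dom_password_encryption password → Spec_password_encryption password (password_encryption password)

-- ===== LEMMAS AND PROOFS =====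
-- common reference form: the encrypted list, two characters per step
def pvEncPairs : List Char → List Char
  | [] => []
  | [a] => [Char.ofNat ((a.toNat : Int) + 3).toNat]
  | a :: b :: rest =>
      Char.ofNat ((a.toNat : Int) + 3).toNat ::
      Char.ofNat ((b.toNat : Int) - 2).toNat :: pvEncPairs rest

theorem pv_foldl_eq : ∀ (l acc : List Char),
    (l.foldl
      (fun (st : Int × List Char) i =>
        (-st.1 + 1, st.2 ++ [Char.ofNat ((i.toNat : Int) + st.1).toNat]))
      (3, acc)).2
    = acc ++ pvEncPairs l := by
  intro l
  induction l using pvEncPairs.induct with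
  | case1 => intro acc; simp [pvEncPairs]
  | case2 a => intro acc; simp [pvEncPairs]
  | case3 a b rest ih =>
    intro acc
    simp only [List.foldl_cons]
    norm_num
    rw [ih]
    simp [pvEncPairs, sub_eq_add_neg]

theorem pv_fold_pairs (z : List (Char × Char)) : ∀ (acc : List Char),
    z.foldl (fun acc pm => acc ++ [pm.1, pm.2]) acc
      = acc ++ z.flatMap (fun pm => [pm.1, pm.2]) := by
  induction z with
  | nil => simp
  | cons p z ih => intro acc; simp [ih]

theorem pv_stride2_tail (b : Char) (rest : List Char) :
    pvStride2 (b :: rest) = b :: pvStride2 (rest.drop 1) := by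
  cases rest <;> simp [pvStride2]

theorem pv_alt_eq (l : List Char) :
    (let plus := (pvStride2 l).map (fun c => Char.ofNat ((c.toNat : Int) + 3).toNat)
     let minus := (pvStride2 (l.drop 1)).map (fun c => Char.ofNat ((c.toNat : Int) - 2).toNat)
     (plus.zip minus).foldl (fun acc pm => acc ++ [pm.1, pm.2]) [] ++ plus.drop minus.length)
    = pvEncPairs l := by
  induction l using pvEncPairs.induct with
  | case1 => simp [pvStride2, pvEncPairs]
  | case2 a => simp [pvStride2, pvEncPairs]
  | case3 a b rest ih =>
    simp only [pvEncPairs, List.drop_succ_cons, List.drop_zero] at *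
    rw [show pvStride2 (a :: b :: rest) = a :: pvStride2 rest from rfl,
        pv_stride2_tail b rest]
    simp only [List.map_cons, List.zip_cons_cons, List.length_cons,
      pv_fold_pairs, List.flatMap_cons, List.drop_succ_cons] at *
    simpa using ih

-- ===== VERDICT (by name: the statement is the Claim_ definition above) =====
theorem password_encryption_spec : Claim_equal_password_encryption := by
  intro password _
  unfold Spec_password_encryption password_encryption password_encryption_alt
  simp only [pv_foldl_eq password.toList [], List.nil_append]
  rw [← pv_alt_eq password.toList]
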